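-- pv_equiv track=rewrite | github.com/andrasfe/specter | specter/incremental_mock.py | _find_file_section_end
-- ===== SOURCE A (Python) =====
-- def _find_file_section_end(src_lines: list[str]) -> int | None:
--     """Find the end of FILE SECTION (before WORKING-STORAGE or next section).
--
--     Returns insertion point for new FD entries, or None.
--     """
--     in_fs = False
--     for i, line in enumerate(src_lines):
--         upper = line.upper().strip()
--         if upper.startswith("*"):
--             continue
--         if "FILE SECTION" in upper:
--             in_fs = True
--             continue
--         if in_fs and any(kw in upper for kw in (
--             "WORKING-STORAGE SECTION", "LINKAGE SECTION",
--             "LOCAL-STORAGE SECTION", "PROCEDURE DIVISION",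
--         )):
--             return i
--     return None
-- ===== SOURCE B (Python) =====
-- _BOUNDARY_KWS = ("WORKING-STORAGE SECTION", "LINKAGE SECTION",
--                  "LOCAL-STORAGE SECTION", "PROCEDURE DIVISION")
--
--
-- def _classify(u: str) -> str:
--     """Tag a normalised (uppercased, stripped) line."""
--     if u.startswith("*"):
--         return "comment"
--     if "FILE SECTION" in u:
--         return "marker"
--     if any(kw in u for kw in _BOUNDARY_KWS):
--         return "boundary"
--     return "other"
--
--
-- def _find_file_section_end(src_lines: list[str]) -> int | None:
--     """Classify every line once, then answer = first boundary index after the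
--     first marker index (pure index arithmetic, no scanning state)."""
--     tags = [_classify(line.upper().strip()) for line in src_lines]
--     marker_idxs = [i for i, t in enumerate(tags) if t == "marker"]
--     if not marker_idxs:
--         return None
--     after = [j for j, t in enumerate(tags) if t == "boundary" and j > marker_idxs[0]]
--     return after[0] if after else None
-- ===== Notes on version B (the rewrite author's own statement) =====
-- stated objective: alternative
-- what changed: Replaces A's stateful scan with an in_fs flag by a classify-then-select formulation: every line is tagged once (comment/marker/boundary/other), then the answer is computed by index arithmetic as the first boundary index strictly after the first marker index.
import Mathlib
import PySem

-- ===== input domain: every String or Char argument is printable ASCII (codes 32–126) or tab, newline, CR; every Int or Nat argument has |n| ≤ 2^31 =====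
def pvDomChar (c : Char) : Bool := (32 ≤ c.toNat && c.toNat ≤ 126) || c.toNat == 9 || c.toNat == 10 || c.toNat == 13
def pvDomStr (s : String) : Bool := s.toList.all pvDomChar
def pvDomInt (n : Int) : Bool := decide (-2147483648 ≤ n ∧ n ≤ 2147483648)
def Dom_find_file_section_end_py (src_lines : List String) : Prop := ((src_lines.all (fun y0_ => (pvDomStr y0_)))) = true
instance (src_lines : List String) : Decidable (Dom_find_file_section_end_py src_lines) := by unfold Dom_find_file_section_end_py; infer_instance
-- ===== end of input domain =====

-- B replaces A's stateful scan (in_fs flag) by classify-then-select over index lists; same O(n) cost, return value only (no mutation).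

-- ===== PORT A =====
-- the loop of A: state = (in_fs, current index i), one pass over the lines
def ffseLoopA (in_fs : Bool) (i : Int) : List String → Option Int
  | [] => none
  | line :: rest =>
    let upper := PySem.Str.strip (PySem.Str.upper line)
    if PySem.Str.startswith upper "*" then ffseLoopA in_fs (i + 1) rest
    else if PySem.Str.isIn "FILE SECTION" upper then ffseLoopA true (i + 1) rest
    else if in_fs && (["WORKING-STORAGE SECTION", "LINKAGE SECTION",
                       "LOCAL-STORAGE SECTION", "PROCEDURE DIVISION"].any
                        (fun kw => PySem.Str.isIn kw upper)) then some i
    else ffseLoopA in_fs (i + 1) rest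

def find_file_section_end_py (src_lines : List String) : Option Int :=
  ffseLoopA false 0 src_lines

-- ===== PORT B =====
def ffseBoundaryKws : List String :=
  ["WORKING-STORAGE SECTION", "LINKAGE SECTION",
   "LOCAL-STORAGE SECTION", "PROCEDURE DIVISION"]

-- _classify: tag a normalised (uppercased, stripped) line
def ffseClassify (u : String) : String :=
  if PySem.Str.startswith u "*" then "comment"
  else if PySem.Str.isIn "FILE SECTION" u then "marker"
  else if ffseBoundaryKws.any (fun kw => PySem.Str.isIn kw u) then "boundary"
  else "other"

-- B: tag every line once, then pure index selection (no scanning state)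
def find_file_section_end_py_alt (src_lines : List String) : Option Int :=
  let tags := src_lines.map (fun line => ffseClassify (PySem.Str.strip (PySem.Str.upper line)))
  let marker_idxs := ((PySem.List.enumerate tags).filter (fun p => p.2 == "marker")).map (·.1)
  match marker_idxs with
  | [] => none
  | m :: _ =>
    let after := ((PySem.List.enumerate tags).filter
        (fun p => p.2 == "boundary" && decide (m < p.1))).map (·.1)
    after.head?

-- ===== PRECONDITION & SPEC =====
def Spec_find_file_section_end_py (src_lines : List String) (out : Option Int) : Prop := out = find_file_section_end_py_alt src_lines
instance (src_lines : List String) (out : Option Int) : Decidable (Spec_find_file_section_end_py src_lines out) := by unfold Spec_find_file_section_end_py; infer_instance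

-- ===== CLAIM (what is proved, stated in full; the proofs are below) =====
def Claim_equal_find_file_section_end_py : Prop := ∀ (src_lines : List String), Dom_find_file_section_end_py src_lines → Spec_find_file_section_end_py src_lines (find_file_section_end_py src_lines)

-- ===== LEMMAS AND PROOFS =====

-- proof-side intermediaries: A's two phases written as plain recursions over the normalised lines
def ffsePhase2 (i : Int) : List String → Option Int
  | [] => none
  | u :: rest =>
    if PySem.Str.startswith u "*" || PySem.Str.isIn "FILE SECTION" u then
      ffsePhase2 (i + 1) rest
    else if ffseBoundaryKws.any (fun kw => PySem.Str.isIn kw u) then some i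
    else ffsePhase2 (i + 1) rest

def ffsePhase1 (i : Int) : List String → Option Int
  | [] => none
  | u :: rest =>
    if !PySem.Str.startswith u "*" && PySem.Str.isIn "FILE SECTION" u then
      ffsePhase2 (i + 1) rest
    else ffsePhase1 (i + 1) rest

-- B's index selection, as a function of the tag list (proof-side restatement of B's body)
def ffseSelect (i : Int) (tags : List String) : Option Int :=
  match ((PySem.List.enumerate tags i).filter (fun p => p.2 == "marker")).map (·.1) with
  | [] => none
  | m :: _ =>
    (((PySem.List.enumerate tags i).filter
        (fun p => p.2 == "boundary" && decide (m < p.1))).map (·.1)).head?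

-- once in_fs is set, A's remaining loop is exactly phase 2 (on the normalised lines)
lemma loopA_true_eq_phase2 (lines : List String) :
    ∀ i : Int, ffseLoopA true i lines
      = ffsePhase2 i (lines.map (fun line => PySem.Str.strip (PySem.Str.upper line))) := by
  induction lines with
  | nil => intro i; simp [ffseLoopA, ffsePhase2]
  | cons line rest ih =>
    intro i
    simp only [ffseLoopA, ffsePhase2, List.map_cons, ffseBoundaryKws,
      PySem.Str.startswith_eq, PySem.Str.isIn_eq]
    split_ifs <;> simp_all [ih]

-- before in_fs is set, A's loop is exactly phase 1
lemma loopA_false_eq_phase1 (lines : List String) :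
    ∀ i : Int, ffseLoopA false i lines
      = ffsePhase1 i (lines.map (fun line => PySem.Str.strip (PySem.Str.upper line))) := by
  induction lines with
  | nil => intro i; simp [ffseLoopA, ffsePhase1]
  | cons line rest ih =>
    intro i
    simp only [ffseLoopA, ffsePhase1, List.map_cons,
      PySem.Str.startswith_eq, PySem.Str.isIn_eq]
    split_ifs <;> simp_all [ih, loopA_true_eq_phase2]

-- the four values of ffseClassify, by its branch conditions
lemma classify_comment {u : String} (h : PySem.Str.startswith u "*" = true) :
    ffseClassify u = "comment" := by unfold ffseClassify; simp_all
lemma classify_marker {u : String} (h1 : PySem.Str.startswith u "*" = false)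
    (h2 : PySem.Str.isIn "FILE SECTION" u = true) :
    ffseClassify u = "marker" := by unfold ffseClassify; simp_all
lemma classify_boundary {u : String} (h1 : PySem.Str.startswith u "*" = false)
    (h2 : PySem.Str.isIn "FILE SECTION" u = false)
    (h3 : ffseBoundaryKws.any (fun kw => PySem.Str.isIn kw u) = true) :
    ffseClassify u = "boundary" := by unfold ffseClassify; simp_all
lemma classify_other {u : String} (h1 : PySem.Str.startswith u "*" = false)
    (h2 : PySem.Str.isIn "FILE SECTION" u = false)
    (h3 : ffseBoundaryKws.any (fun kw => PySem.Str.isIn kw u) = false) :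
    ffseClassify u = "other" := by unfold ffseClassify; simp_all

-- every index produced by enumerate from s is ≥ s
lemma fst_mem_enumerate_ge {α : Type} {p : Int × α} {xs : List α} {s : Int}
    (h : p ∈ PySem.List.enumerate xs s) : s ≤ p.1 := by
  rcases (PySem.List.mem_enumerate_iff _ _ _).1 h with ⟨k, hk, rfl⟩
  simp

-- a strictly-lower index bound is vacuous on the filter over a suffix
lemma filter_bound_vacuous (tags : List String) (s m : Int) (hm : m < s) :
    (PySem.List.enumerate tags s).filter (fun p => p.2 == "boundary" && decide (m < p.1))
      = (PySem.List.enumerate tags s).filter (fun p => p.2 == "boundary") := by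
  apply List.filter_congr
  intro p hp
  have := fst_mem_enumerate_ge hp
  simp [show m < p.1 by omega]

-- selecting past a non-marker tag just advances the start index
lemma select_cons_nonmarker (t : String) (ts : List String) (i : Int)
    (hm : (t == "marker") = false) : ffseSelect i (t :: ts) = ffseSelect (i + 1) ts := by
  unfold ffseSelect
  simp only [PySem.List.enumerate_cons, List.filter_cons, hm, Bool.false_eq_true, if_false]
  cases hmatch : (((PySem.List.enumerate ts (i + 1)).filter
      (fun p => p.2 == "marker")).map (·.1)) with
  | nil => rfl
  | cons m ms =>
    have hmem : m ∈ ((PySem.List.enumerate ts (i + 1)).filter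
        (fun p => p.2 == "marker")).map (·.1) := by rw [hmatch]; exact List.mem_cons_self
    rcases List.mem_map.1 hmem with ⟨p, hpf, rfl⟩
    have hge : i + 1 ≤ p.1 := fst_mem_enumerate_ge (List.mem_of_mem_filter hpf)
    have hhead : ((t == "boundary") && decide (p.1 < (i : Int))) = false := by
      simp [show ¬ (p.1 < (i : Int)) by omega]
    simp only [hhead, Bool.false_eq_true, if_false]

-- selecting at a marker tag picks m = i and keeps exactly the later boundary tags
lemma select_cons_marker (ts : List String) (i : Int) :
    ffseSelect i ("marker" :: ts)
      = (((PySem.List.enumerate ts (i + 1)).filter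
            (fun p => p.2 == "boundary")).map (·.1)).head? := by
  unfold ffseSelect
  simp only [PySem.List.enumerate_cons, List.filter_cons]
  have h1 : ((("marker" : String) == "marker")) = true := by decide
  have h2 : ((("marker" : String) == "boundary") && decide ((i : Int) < i)) = false := by
    simp
  simp only [h1, if_true, List.map_cons, h2, Bool.false_eq_true, if_false]
  rw [filter_bound_vacuous ts (i + 1) i (by omega)]

-- phase 2 equals the boundary selection over the classified suffix
lemma phase2_eq_select (us : List String) :
    ∀ i : Int, ffsePhase2 i us
      = (((PySem.List.enumerate (us.map ffseClassify) i).filter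
            (fun p => p.2 == "boundary")).map (·.1)).head? := by
  induction us with
  | nil => intro i; simp [ffsePhase2]
  | cons u rest ih =>
    intro i
    simp only [List.map_cons, PySem.List.enumerate_cons, List.filter_cons]
    cases h1 : PySem.Str.startswith u "*" with
    | true => simp_all [ffsePhase2, classify_comment h1, ih]
    | false =>
      cases h2 : PySem.Str.isIn "FILE SECTION" u with
      | true => simp_all [ffsePhase2, classify_marker h1 h2, ih]
      | false =>
        cases h3 : ffseBoundaryKws.any (fun kw => PySem.Str.isIn kw u) with
        | true => simp_all [ffsePhase2, classify_boundary h1 h2 h3]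
        | false => simp_all [ffsePhase2, classify_other h1 h2 h3, ih]

-- phase 1 equals B's classify-then-select formulation
lemma phase1_eq_select (us : List String) :
    ∀ i : Int, ffsePhase1 i us = ffseSelect i (us.map ffseClassify) := by
  induction us with
  | nil => intro i; simp [ffsePhase1, ffseSelect]
  | cons u rest ih =>
    intro i
    cases h1 : PySem.Str.startswith u "*" with
    | true =>
      rw [List.map_cons, classify_comment h1,
        select_cons_nonmarker _ _ _ (by decide)]
      simp_all [ffsePhase1, ih]
    | false =>
      cases h2 : PySem.Str.isIn "FILE SECTION" u with
      | true =>
        rw [List.map_cons, classify_marker h1 h2, select_cons_marker]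
        simp_all [ffsePhase1, phase2_eq_select]
      | false =>
        cases h3 : ffseBoundaryKws.any (fun kw => PySem.Str.isIn kw u) with
        | true =>
          rw [List.map_cons, classify_boundary h1 h2 h3,
            select_cons_nonmarker _ _ _ (by decide)]
          simp_all [ffsePhase1, ih]
        | false =>
          rw [List.map_cons, classify_other h1 h2 h3,
            select_cons_nonmarker _ _ _ (by decide)]
          simp_all [ffsePhase1, ih]

-- B's port is ffseSelect applied to the classified lines
lemma alt_eq_select (src_lines : List String) :
    find_file_section_end_py_alt src_lines
      = ffseSelect 0 ((src_lines.map (fun line => PySem.Str.strip (PySem.Str.upper line))).map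
          ffseClassify) := by
  unfold find_file_section_end_py_alt ffseSelect
  simp [List.map_map, Function.comp_def]

-- ===== VERDICT (by name: the statement is the Claim_ definition above) =====
theorem find_file_section_end_py_spec : Claim_equal_find_file_section_end_py := by
  intro src_lines _
  unfold Spec_find_file_section_end_py find_file_section_end_py
  rw [loopA_false_eq_phase1 src_lines 0, phase1_eq_select, alt_eq_select]
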